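-- pv_equiv track=rewrite | github.com/Tran-Ngoc-Bao/Analyze_Game_Data | spark/code/transform_google_play.py | extract_classify
-- ===== SOURCE A (Python) =====
-- def extract_classify(classify):
-- 	start = 0
-- 	for i in range(len(classify)):
-- 		if classify[i].isupper():
-- 			start = i
-- 			break
-- 	result = classify[start]
-- 	for i in range(start + 1, len(classify)):
-- 		if classify[i].isalpha():
-- 			if classify[i].isupper() and classify[i - 1].isalpha():
-- 				break
-- 			result += classify[i]
-- 	return result
-- ===== SOURCE B (Python) =====
-- def extract_classify(classify):
--     collecting = False
--     acc = []       # chars of the camel-case word once we have seen an uppercase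
--     fallback = []  # first char + later alphabetic chars, used if no uppercase exists
--     prev = ''
--     for c in classify:
--         if collecting:
--             if c.isalpha():
--                 if c.isupper() and prev.isalpha():
--                     return ''.join(acc)
--                 acc.append(c)
--         elif c.isupper():
--             collecting = True
--             acc.append(c)
--         else:
--             if not fallback:
--                 fallback.append(c)
--             elif c.isalpha():
--                 fallback.append(c)
--         prev = c
--     return ''.join(acc if collecting else fallback)
-- ===== Notes on version B (the rewrite author's own statement) =====
-- stated objective: alternative
-- what changed: A makes two index-based passes (scan for the first uppercase, then rebuild from that index with classify[i-1] lookups and quadratic-prone string +=); B is a single index-free pass: a state machine over the characters that speculatively accumulates a fallback word while seeking, switches to collecting on the first uppercase, carries the previous character in its state, and early-returns at the word boundary; list-append accumulation plus one final join gives a measured constant-factor speedup over A's repeated string concatenation.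
import Mathlib
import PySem

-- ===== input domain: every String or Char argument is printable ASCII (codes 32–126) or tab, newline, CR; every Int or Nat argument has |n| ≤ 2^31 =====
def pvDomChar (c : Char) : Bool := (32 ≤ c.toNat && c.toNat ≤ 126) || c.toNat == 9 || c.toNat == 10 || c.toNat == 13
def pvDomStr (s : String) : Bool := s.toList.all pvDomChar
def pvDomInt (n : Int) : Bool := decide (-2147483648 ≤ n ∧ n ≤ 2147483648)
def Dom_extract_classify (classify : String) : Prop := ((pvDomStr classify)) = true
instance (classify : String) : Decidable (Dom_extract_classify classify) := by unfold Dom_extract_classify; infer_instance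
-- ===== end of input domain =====

-- B replaces A's two index-based passes by one index-free state-machine pass with a
-- speculative fallback accumulator (objective: alternative); on the empty string A
-- raises IndexError (excluded by Pre_), where B returns "".

-- ===== PORT A =====
-- first loop of A: scan for the first uppercase character, remembering its index
def pvAStart : List Char → Nat → Option Nat
  | [], _ => none
  | c :: r, i => if PySem.Chars.isupper c then some i else pvAStart r (i + 1)

-- second loop of A: build `result`, breaking at an uppercase char preceded by an alphabetic char
def pvALoop (cs : List Char) (i : Nat) (res : List Char) : List Char :=
  if h : i < cs.length then
    if PySem.Chars.isalpha cs[i] then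
      if PySem.Chars.isupper cs[i] && PySem.Chars.isalpha (cs.getD (i - 1) ' ') then res
      else pvALoop cs (i + 1) (res ++ [cs[i]])
    else pvALoop cs (i + 1) res
  else res
  termination_by cs.length - i

def extract_classify (classify : String) : String :=
  let cs := classify.toList
  let start := (pvAStart cs 0).getD 0
  if h : start < cs.length then String.mk (pvALoop cs (start + 1) [cs[start]])
  else ""  -- classify[start] raises IndexError in Python (empty string); outside Pre_

-- ===== PORT B =====
-- the loop state of Source B: done = the early `return` has fired
structure PvBSt where
  done : Bool
  coll : Bool
  acc : List Char
  fb : List Char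
  prev : Char  -- Python's prev starts as '' ; only isalpha is asked of it, false for '' and for ' '
  deriving Repr

def pvBStep (s : PvBSt) (c : Char) : PvBSt :=
  if s.done then s
  else if s.coll then
    if PySem.Chars.isalpha c then
      if PySem.Chars.isupper c && PySem.Chars.isalpha s.prev then { s with done := true }
      else { s with acc := s.acc ++ [c], prev := c }
    else { s with prev := c }
  else if PySem.Chars.isupper c then
    { s with coll := true, acc := s.acc ++ [c], prev := c }
  else if s.fb = [] then { s with fb := [c], prev := c }
  else if PySem.Chars.isalpha c then { s with fb := s.fb ++ [c], prev := c }
  else { s with prev := c }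

def extract_classify_alt (classify : String) : String :=
  let s := classify.toList.foldl pvBStep ⟨false, false, [], [], ' '⟩
  String.mk (if s.coll then s.acc else s.fb)

-- ===== PRECONDITION & SPEC =====
-- Pre_ excludes only the empty string, on which A raises IndexError.
def Pre_extract_classify (classify : String) : Prop := classify ≠ ""
instance (classify : String) : Decidable (Pre_extract_classify classify) := by unfold Pre_extract_classify; infer_instance
def pvWitness_extract_classify : String := "InstalledApp"

def Spec_extract_classify (classify : String) (out : String) : Prop := out = extract_classify_alt classify
instance (classify : String) (out : String) : Decidable (Spec_extract_classify classify out) := by unfold Spec_extract_classify; infer_instance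

-- ===== CLAIM (what is proved, stated in full; the proofs are below) =====
def Claim_equal_extract_classify : Prop := ∀ (classify : String), Dom_extract_classify classify → Pre_extract_classify classify → Spec_extract_classify classify (extract_classify classify)

-- ===== LEMMAS AND PROOFS =====

theorem pvGetLastD_cons (c p : Char) (r : List Char) :
    (c :: r).getLast?.getD p = r.getLast?.getD c := by
  cases r with
  | nil => rfl
  | cons d t =>
    rw [List.getLast?_cons_cons]
    rcases h : (d :: t).getLast? with _ | x
    · exact absurd h (by simp)
    · rfl

-- once done, the fold is inert
theorem pvBStep_done (s : PvBSt) (hs : s.done = true) (l : List Char) :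
    l.foldl pvBStep s = s := by
  induction l with
  | nil => rfl
  | cons c r ih => simp [List.foldl_cons, pvBStep, hs, ih]

-- collect phase of B = A's second loop
theorem pvB_collect (cs : List Char) (i : Nat) (hi : 1 ≤ i) (res fb : List Char) :
    ((cs.drop i).foldl pvBStep ⟨false, true, res, fb, cs.getD (i - 1) ' '⟩).acc
      = pvALoop cs i res
    ∧ ((cs.drop i).foldl pvBStep ⟨false, true, res, fb, cs.getD (i - 1) ' '⟩).coll = true := by
  by_cases h : i < cs.length
  · have hdrop : cs.drop i = cs[i] :: cs.drop (i + 1) := List.drop_eq_getElem_cons h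
    have hgd : cs.getD i ' ' = cs[i] := by simp [List.getD, h]
    rw [hdrop, List.foldl_cons, pvALoop, dif_pos h]
    by_cases hal : PySem.Chars.isalpha cs[i] = true
    · by_cases hbrk : (PySem.Chars.isupper cs[i] && PySem.Chars.isalpha (cs.getD (i - 1) ' ')) = true
      · simp only [pvBStep, hal, hbrk, if_pos, ↓reduceIte, Bool.false_eq_true, if_pos hal]
        rw [pvBStep_done _ rfl]
        simp [hbrk]
      · have hstep : (⟨false, true, res ++ [cs[i]], fb, cs[i]⟩ : PvBSt)
            = ⟨false, true, res ++ [cs[i]], fb, cs.getD ((i+1) - 1) ' '⟩ := by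
          simp [List.getD, h]
        simp only [pvBStep, hal, hbrk, ↓reduceIte, Bool.false_eq_true, if_pos hal, if_neg hbrk]
        rw [hstep]
        exact pvB_collect cs (i + 1) (by omega) (res ++ [cs[i]]) fb
    · have hstep : (⟨false, true, res, fb, cs[i]⟩ : PvBSt)
          = ⟨false, true, res, fb, cs.getD ((i+1) - 1) ' '⟩ := by simp [List.getD, h]
      simp only [pvBStep, hal, ↓reduceIte, Bool.false_eq_true, if_neg hal]
      rw [hstep]
      exact pvB_collect cs (i + 1) (by omega) res fb
  · have hd : cs.drop i = [] := List.drop_eq_nil_of_le (by omega)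
    rw [hd, pvALoop, dif_neg h]
    exact ⟨rfl, rfl⟩
  termination_by cs.length - i

-- seek phase of B over a prefix with no uppercase char, starting from a nonempty fallback
theorem pvB_seek (pre : List Char) (hpre : ∀ c ∈ pre, PySem.Chars.isupper c = false)
    (fb : List Char) (hfb : fb ≠ []) (p : Char) :
    pre.foldl pvBStep ⟨false, false, [], fb, p⟩
      = ⟨false, false, [], fb ++ pre.filter (fun c => PySem.Chars.isalpha c),
          pre.getLastD p⟩ := by
  induction pre generalizing fb p with
  | nil => simp
  | cons c r ih =>
    have hc : PySem.Chars.isupper c = false := hpre c (by simp)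
    have hr : ∀ d ∈ r, PySem.Chars.isupper d = false := fun d hd => hpre d (by simp [hd])
    rw [List.foldl_cons]
    by_cases hal : PySem.Chars.isalpha c = true
    · simp only [pvBStep, hc, hfb, ↓reduceIte, Bool.false_eq_true, if_neg hfb, hal]
      rw [ih hr (fb ++ [c]) (by simp) c]
      simp [List.filter_cons, hal, pvGetLastD_cons]
    · simp only [pvBStep, hc, ↓reduceIte, Bool.false_eq_true, if_neg hfb, hal]
      rw [ih hr fb hfb c]
      simp [List.filter_cons, hal, pvGetLastD_cons]

-- seek phase never sets done/coll and keeps acc empty, whatever the fallback holds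
theorem pvB_seek_shape (pre : List Char) (hpre : ∀ c ∈ pre, PySem.Chars.isupper c = false)
    (fb : List Char) (p : Char) :
    ∃ f q, pre.foldl pvBStep ⟨false, false, [], fb, p⟩ = ⟨false, false, [], f, q⟩ := by
  induction pre generalizing fb p with
  | nil => exact ⟨fb, p, rfl⟩
  | cons c r ih =>
    have hc : PySem.Chars.isupper c = false := hpre c (by simp)
    have hr : ∀ d ∈ r, PySem.Chars.isupper d = false := fun d hd => hpre d (by simp [hd])
    rw [List.foldl_cons]
    by_cases hfb : fb = []
    · simp only [pvBStep, hc, Bool.false_eq_true, ↓reduceIte, hfb, if_pos rfl]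
      exact ih hr [c] c
    · by_cases hal : PySem.Chars.isalpha c = true
      · simp only [pvBStep, hc, Bool.false_eq_true, ↓reduceIte, if_neg hfb, hal]
        exact ih hr (fb ++ [c]) c
      · simp only [pvBStep, hc, Bool.false_eq_true, ↓reduceIte, if_neg hfb, hal]
        exact ih hr fb c

-- A's second loop appends every alphabetic char when the string has no uppercase char
theorem pvALoop_noupper (cs : List Char) (hcs : ∀ c ∈ cs, PySem.Chars.isupper c = false)
    (i : Nat) (res : List Char) :
    pvALoop cs i res = res ++ ((cs.drop i).filter (fun c => PySem.Chars.isalpha c)) := by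
  by_cases h : i < cs.length
  · have hdrop : cs.drop i = cs[i] :: cs.drop (i + 1) := List.drop_eq_getElem_cons h
    have hup : PySem.Chars.isupper cs[i] = false := hcs _ (by simp)
    rw [pvALoop, dif_pos h]
    conv_rhs => rw [hdrop]
    by_cases hal : PySem.Chars.isalpha cs[i] = true
    · rw [if_pos hal, if_neg (by simp [hup]), pvALoop_noupper cs hcs (i + 1) (res ++ [cs[i]]),
          List.filter_cons]
      simp [hal]
    · rw [if_neg hal, pvALoop_noupper cs hcs (i + 1) res, List.filter_cons]
      simp [hal]
  · rw [pvALoop, dif_neg h, List.drop_eq_nil_of_le (by omega)]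
    simp
  termination_by cs.length - i

theorem pvAStart_eq_findIdx? (cs : List Char) (i : Nat) :
    pvAStart cs i = (cs.findIdx? (fun c => PySem.Chars.isupper c)).map (· + i) := by
  induction cs generalizing i with
  | nil => simp [pvAStart]
  | cons c r ih =>
    by_cases h : PySem.Chars.isupper c
    · simp [pvAStart, List.findIdx?_cons, h]
    · simp only [pvAStart, List.findIdx?_cons, h, if_neg, Bool.false_eq_true, ↓reduceIte, ih]
      cases r.findIdx? (fun c => PySem.Chars.isupper c) <;> simp <;> omega

-- ===== VERDICT (by name: the statement is the Claim_ definition above) =====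
theorem extract_classify_spec : Claim_equal_extract_classify := by
  intro classify _ hpre
  unfold Spec_extract_classify
  simp only [extract_classify, extract_classify_alt]
  have hne : classify.toList ≠ [] := by
    intro h; exact hpre (by cases classify with | _ d => cases d <;> simp_all)
  set cs := classify.toList with hcs
  have hstart : pvAStart cs 0 = cs.findIdx? (fun c => PySem.Chars.isupper c) := by
    rw [pvAStart_eq_findIdx?]
    cases cs.findIdx? (fun c => PySem.Chars.isupper c) <;> simp
  rcases hfi : cs.findIdx? (fun c => PySem.Chars.isupper c) with _ | st
  · -- no uppercase: A's start = 0, B never enters collect mode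
    have hnoup : ∀ c ∈ cs, PySem.Chars.isupper c = false := by
      intro c hc
      have := List.findIdx?_eq_none_iff.mp hfi
      simpa using this c hc
    obtain ⟨c0, rest, hsplit⟩ := List.exists_cons_of_ne_nil hne
    have hlen : 0 < cs.length := by rw [hsplit]; simp
    simp only [hstart, hfi, Option.getD_none]
    rw [dif_pos hlen]
    have hfold : cs.foldl pvBStep ⟨false, false, [], [], ' '⟩
        = ⟨false, false, [], c0 :: rest.filter (fun c => PySem.Chars.isalpha c),
            rest.getLastD c0⟩ := by
      rw [hsplit, List.foldl_cons]
      have hc0 : PySem.Chars.isupper c0 = false := hnoup c0 (by rw [hsplit]; simp)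
      simp only [pvBStep, hc0, Bool.false_eq_true, ↓reduceIte]
      exact pvB_seek rest (fun d hd => hnoup d (by rw [hsplit]; simp [hd])) [c0] (by simp) c0
    rw [hfold]
    simp only [Bool.false_eq_true, ↓reduceIte]
    rw [pvALoop_noupper cs hnoup 1 [cs[0]]]
    simp [hsplit]
  · -- first uppercase at index st
    have h1 := List.findIdx?_eq_some_iff_findIdx_eq.mp hfi
    have hlt : st < cs.length := h1.1
    have hup : PySem.Chars.isupper cs[st] = true := by
      have hw : cs.findIdx (fun c => PySem.Chars.isupper c) < cs.length := by
        rw [h1.2]; exact hlt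
      have h3 := List.findIdx_getElem (xs := cs) (p := fun c => PySem.Chars.isupper c) (w := hw)
      simpa [h1.2] using h3
    have hprefix : ∀ c ∈ cs.take st, PySem.Chars.isupper c = false := by
      intro c hc
      obtain ⟨j, hj, hjc⟩ := List.mem_take_iff_getElem.mp hc
      subst hjc
      exact List.not_of_lt_findIdx (xs := cs) (p := fun c => PySem.Chars.isupper c)
        (i := j) (by rw [h1.2]; omega)
    simp only [hstart, hfi, Option.getD_some]
    rw [dif_pos hlt]
    -- run B: seek over take st, switch at cs[st], collect over drop (st+1)
    have hdecomp : cs = cs.take st ++ cs[st] :: cs.drop (st + 1) := by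
      conv_lhs => rw [← List.take_append_drop st cs]
      rw [List.drop_eq_getElem_cons hlt]
    have hcoll := pvB_collect cs (st + 1) (by omega) [cs[st]]
    obtain ⟨f, q, hseek⟩ := pvB_seek_shape (cs.take st) hprefix [] ' '
    conv_rhs => rw [hdecomp]
    rw [List.foldl_append, hseek, List.foldl_cons]
    simp only [pvBStep, hup, Bool.false_eq_true, ↓reduceIte]
    have hprev : cs[st] = cs.getD ((st + 1) - 1) ' ' := by simp [List.getD, hlt]
    rw [show (⟨false, true, [] ++ [cs[st]], f, cs[st]⟩ : PvBSt)
          = ⟨false, true, [cs[st]], f, cs.getD ((st + 1) - 1) ' '⟩ by rw [← hprev]; rfl]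
    obtain ⟨hacc, hc⟩ := hcoll f
    rw [hc, hacc]
    simp
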